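-- pv_equiv track=rewrite | github.com/hhassan1/Crypto | cripto1.py | normalizar
-- ===== SOURCE A (Python) =====
-- def normalizar(texto):
--     tn = ""
--     for letra in texto:
--         indx = ord(letra)
--         if 97 <= indx <= 122:
--             indx = indx - 32
--             tn = tn + chr(indx)
--         elif 65 <= indx <= 90:
--             tn = tn + letra
--     return tn
-- ===== SOURCE B (Python) =====
-- import re
--
-- def normalizar(texto):
--     return re.sub('[^A-Za-z]', '', texto).upper()
-- ===== Notes on version B (the rewrite author's own statement) =====
-- stated objective: idiomatic
-- what changed: replaces the char-by-char ord-range loop with repeated string concatenation by a single regex pass deleting non-letters followed by one bulk .upper()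
import Mathlib
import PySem

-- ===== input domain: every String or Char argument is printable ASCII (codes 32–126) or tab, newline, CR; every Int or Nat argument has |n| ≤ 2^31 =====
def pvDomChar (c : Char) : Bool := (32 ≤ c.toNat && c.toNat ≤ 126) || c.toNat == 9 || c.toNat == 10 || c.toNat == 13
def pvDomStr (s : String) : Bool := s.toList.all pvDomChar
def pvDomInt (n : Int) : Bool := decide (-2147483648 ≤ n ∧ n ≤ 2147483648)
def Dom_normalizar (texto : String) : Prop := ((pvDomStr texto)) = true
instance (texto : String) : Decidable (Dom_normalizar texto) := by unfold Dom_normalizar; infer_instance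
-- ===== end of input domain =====

-- B replaces A's char-by-char ord-range loop with concatenation by one regex pass
-- deleting non-letters followed by a bulk .upper() (objective: idiomatic).

-- ===== PORT A =====
def normalizar (texto : String) : String :=
  String.ofList (texto.toList.foldl (fun tn letra =>
    let indx : Int := letra.toNat
    if 97 ≤ indx ∧ indx ≤ 122 then
      tn ++ [Char.ofNat (indx - 32).toNat]
    else if 65 ≤ indx ∧ indx ≤ 90 then
      tn ++ [letra]
    else tn) [])

-- ===== PORT B =====
-- re.sub('[^A-Za-z]', '', texto) keeps exactly the ASCII letters, i.e. filter isalpha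
-- (exact on the ASCII domain); then .upper() = PySem.Str.upper.
def normalizar_alt (texto : String) : String :=
  PySem.Str.upper (String.ofList (texto.toList.filter PySem.Chars.isalpha))

-- ===== PRECONDITION & SPEC =====
def Spec_normalizar (texto : String) (out : String) : Prop := out = normalizar_alt texto
instance (texto : String) (out : String) : Decidable (Spec_normalizar texto out) := by unfold Spec_normalizar; infer_instance

-- ===== CLAIM (what is proved, stated in full; the proofs are below) =====
def Claim_equal_normalizar : Prop := ∀ (texto : String), Dom_normalizar texto → Spec_normalizar texto (normalizar texto)

-- ===== LEMMAS AND PROOFS =====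

theorem normalizar_fold (l : List Char) (acc : List Char) :
    l.foldl (fun tn letra =>
      let indx : Int := letra.toNat
      if 97 ≤ indx ∧ indx ≤ 122 then
        tn ++ [Char.ofNat (indx - 32).toNat]
      else if 65 ≤ indx ∧ indx ≤ 90 then
        tn ++ [letra]
      else tn) acc
    = acc ++ PySem.Chars.upper (l.filter PySem.Chars.isalpha) := by
  induction l generalizing acc with
  | nil => simp [PySem.Chars.upper]
  | cons c l ih =>
    simp only [List.foldl_cons, ih, List.filter_cons]
    by_cases hlo : 97 ≤ (c.toNat : Int) ∧ (c.toNat : Int) ≤ 122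
    · have hn : 97 ≤ c.toNat ∧ c.toNat ≤ 122 := by omega
      have hlow : PySem.Chars.islower c = true := by
        simp [PySem.Chars.islower, Char.le_def, UInt32.le_iff_toNat_le]; omega
      have halpha : PySem.Chars.isalpha c = true := by
        simp [PySem.Chars.isalpha, hlow]
      have hchr : Char.ofNat ((c.toNat : Int) - 32).toNat = Char.ofNat (c.toNat - 32) := by
        congr 1; omega
      simp [hlo, halpha, hchr, PySem.Chars.upper, PySem.Chars.upperChar, hlow]
    · by_cases hup : 65 ≤ (c.toNat : Int) ∧ (c.toNat : Int) ≤ 90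
      · have hnlow : PySem.Chars.islower c = false := by
          simp [PySem.Chars.islower, Char.le_def, UInt32.le_iff_toNat_le]; omega
        have hu : PySem.Chars.isupper c = true := by
          simp [PySem.Chars.isupper, Char.le_def, UInt32.le_iff_toNat_le]; omega
        have halpha : PySem.Chars.isalpha c = true := by
          simp [PySem.Chars.isalpha, hu]
        have hn1 : ¬(97 ≤ c.toNat ∧ c.toNat ≤ 122) := by omega
        have hn2 : 65 ≤ c.toNat ∧ c.toNat ≤ 90 := by omega
        simp [hn1, hn2, halpha, PySem.Chars.upper, PySem.Chars.upperChar, hnlow]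
      · have hnlow : PySem.Chars.islower c = false := by
          simp [PySem.Chars.islower, Char.le_def, UInt32.le_iff_toNat_le]; omega
        have hnu : PySem.Chars.isupper c = false := by
          simp [PySem.Chars.isupper, Char.le_def, UInt32.le_iff_toNat_le]; omega
        have halpha : PySem.Chars.isalpha c = false := by
          simp [PySem.Chars.isalpha, hnu, hnlow]
        have hn1 : ¬(97 ≤ c.toNat ∧ c.toNat ≤ 122) := by omega
        have hn2 : ¬(65 ≤ c.toNat ∧ c.toNat ≤ 90) := by omega
        simp [hn1, hn2, halpha]

-- ===== VERDICT (by name: the statement is the Claim_ definition above) =====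
theorem normalizar_spec : Claim_equal_normalizar := by
  intro texto _
  unfold Spec_normalizar normalizar normalizar_alt
  rw [normalizar_fold]
  simp [PySem.Str.upper]
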